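-- pv_equiv track=rewrite | github.com/thomasdgr/HEPIA-Projects | Telecom/Huffman/decod_Dagier_Blancy.py | decode_char
-- ===== SOURCE A (Python) =====
-- def decode_char(inputstring, inputdict) :
--     output_string = ""
--     string_tmp = ""
--     for c in inputstring:
--         string_tmp += c
--         if string_tmp in list(inputdict.values()):
--             indeks = list(inputdict.values()).index(string_tmp)
--             output_string += list(inputdict.keys())[indeks]
--             string_tmp =""
--
--     return output_string
-- ===== SOURCE B (Python) =====
-- def decode_char(inputstring, inputdict):
--     # Build a prefix trie (symbol, children) from the codeword dict, then decode in one pass.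
--     root = (None, {})
--     for key, value in inputdict.items():
--         root = _trie_insert(root, value, key)
--     out = []
--     node = root
--     for ch in inputstring:
--         child = node[1].get(ch)
--         if child is None:
--             break
--         node = child
--         if node[0] is not None:
--             out.append(node[0])
--             node = root
--     return "".join(out)
--
--
-- def _trie_insert(node, path, key):
--     sym, children = node
--     if not path:
--         return (key if sym is None else sym, children)
--     child = children.get(path[0], (None, {}))
--     new_children = dict(children)
--     new_children[path[0]] = _trie_insert(child, path[1:], key)
--     return (sym, new_children)
-- ===== Notes on version B (the rewrite author's own statement) =====
-- stated objective: faster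
-- what changed: B builds a prefix trie from the codeword dict once and decodes in a single pass with an early stop once the buffer leaves the trie, instead of rebuilding list(inputdict.values()) and scanning it with .index for every input character.
import Mathlib
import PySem

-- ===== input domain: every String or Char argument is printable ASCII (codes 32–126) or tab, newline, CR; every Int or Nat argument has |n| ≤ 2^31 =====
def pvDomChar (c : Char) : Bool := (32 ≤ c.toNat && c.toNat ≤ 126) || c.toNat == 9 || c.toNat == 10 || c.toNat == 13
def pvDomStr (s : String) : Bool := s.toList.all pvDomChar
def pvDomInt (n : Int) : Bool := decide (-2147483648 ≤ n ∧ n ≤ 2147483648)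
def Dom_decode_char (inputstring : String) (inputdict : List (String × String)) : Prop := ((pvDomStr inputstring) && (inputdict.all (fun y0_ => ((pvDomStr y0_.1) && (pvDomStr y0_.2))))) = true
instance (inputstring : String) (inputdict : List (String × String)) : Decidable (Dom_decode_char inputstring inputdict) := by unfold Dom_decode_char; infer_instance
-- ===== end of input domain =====

-- B replaces A's per-character rebuild-and-scan of list(inputdict.values()) by a prefix trie
-- built once from the codeword dict and a single decoding pass that stops once the buffer
-- leaves the trie (objective: a different algorithm that avoids the repeated inner scans).

-- Python dict semantics for inputdict, with key/value strings as char lists (shared input view)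
def pvDictItems (inputdict : List (String × String)) : List (List Char × List Char) :=
  (PySem.Dict.ofList inputdict).items.map (fun kv => (kv.1.toList, kv.2.toList))

-- ===== PORT A =====
def decode_char (inputstring : String) (inputdict : List (String × String)) : String :=
  let items := pvDictItems inputdict
  let vals := items.map (fun kv => kv.2)
  let keys := items.map (fun kv => kv.1)
  let st := inputstring.toList.foldl (fun (st : List Char × List Char) c =>
    let tmp := st.2 ++ [c]
    if vals.contains tmp then
      let indeks : Nat := (PySem.List.index? vals tmp).getD 0
      (st.1 ++ (PySem.List.pyGet? keys (indeks : Int)).getD [], [])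
    else
      (st.1, tmp)) ([], [])
  String.ofList st.1

-- ===== PORT B =====
-- trie node = (optional symbol, children); children as an explicit mutual pair
-- (instead of a nested inductive)
mutual
inductive PvTrie where
  | mk : Option (List Char) → PvChildren → PvTrie
deriving Repr
inductive PvChildren where
  | nil : PvChildren
  | cons : Char → PvTrie → PvChildren → PvChildren
deriving Repr
end

def pvSym : PvTrie → Option (List Char) | .mk s _ => s

def pvCh : PvTrie → PvChildren | .mk _ ch => ch

-- children.get(c) (Python dict.get)
def pvChildGet : PvChildren → Char → Option PvTrie
  | .nil, _ => none
  | .cons a t rest, c => if a = c then some t else pvChildGet rest c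

-- new_children[path[0]] = … (Python dict: overwrite keeps position, a new key appends)
def pvChildSet : PvChildren → Char → PvTrie → PvChildren
  | .nil, c, t => .cons c t .nil
  | .cons a u rest, c, t => if a = c then .cons a t rest else .cons a u (pvChildSet rest c t)

-- _trie_insert(node, path, key)
def pvTrieInsert : PvTrie → List Char → List Char → PvTrie
  | .mk sym ch, [], k => .mk (some (sym.getD k)) ch
  | .mk sym ch, c :: rest, k =>
      .mk sym (pvChildSet ch c (pvTrieInsert ((pvChildGet ch c).getD (.mk none .nil)) rest k))
termination_by _ p _ => p.length

-- the decode loop of B ('break' = return the emitted list so far)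
def pvDecode (root : PvTrie) : PvTrie → List Char → List (List Char)
  | _, [] => []
  | cur, c :: rest =>
    match pvChildGet (pvCh cur) c with
    | none => []
    | some child =>
      match pvSym child with
      | some s => s :: pvDecode root root rest
      | none => pvDecode root child rest

def decode_char_alt (inputstring : String) (inputdict : List (String × String)) : String :=
  let items := pvDictItems inputdict
  let root := items.foldl (fun t kv => pvTrieInsert t kv.2 kv.1) (.mk none .nil)
  String.ofList ((pvDecode root root inputstring.toList).flatten)

-- ===== PRECONDITION & SPEC =====
def Spec_decode_char (inputstring : String) (inputdict : List (String × String)) (out : String) : Prop := out = decode_char_alt inputstring inputdict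
instance (inputstring : String) (inputdict : List (String × String)) (out : String) : Decidable (Spec_decode_char inputstring inputdict out) := by unfold Spec_decode_char; infer_instance

-- ===== CLAIM (what is proved, stated in full; the proofs are below) =====
def Claim_equal_decode_char : Prop := ∀ (inputstring : String) (inputdict : List (String × String)), Dom_decode_char inputstring inputdict → Spec_decode_char inputstring inputdict (decode_char inputstring inputdict)

-- ===== LEMMAS AND PROOFS =====

-- first key of the dict whose value is p (what A emits when its buffer matches)
def pvFirstKey (items : List (List Char × List Char)) (p : List Char) : Option (List Char) :=
  (items.find? (fun kv => kv.2 == p)).map (fun kv => kv.1)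

-- A's loop as a recursion over the remaining input, with the buffer as argument
def pvArun (items : List (List Char × List Char)) : List Char → List Char → List Char
  | [], _ => []
  | c :: rest, tmp =>
    match pvFirstKey items (tmp ++ [c]) with
    | some k => k ++ pvArun items rest []
    | none => pvArun items rest (tmp ++ [c])

def pvFindT : PvTrie → List Char → Option PvTrie
  | t, [] => some t
  | t, c :: rest => (pvChildGet (pvCh t) c).bind (fun u => pvFindT u rest)

def pvSymAt (t : PvTrie) (p : List Char) : Option (List Char) := (pvFindT t p).bind pvSym

def pvBuild (items : List (List Char × List Char)) (t : PvTrie) : PvTrie :=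
  items.foldl (fun t kv => pvTrieInsert t kv.2 kv.1) t

theorem pv_childGet_set : ∀ (ch : PvChildren) (c : Char) (t : PvTrie) (c' : Char),
    pvChildGet (pvChildSet ch c t) c' = if c' = c then some t else pvChildGet ch c'
  | .nil, c, t, c' => by
    by_cases h : c' = c
    · simp [pvChildSet, pvChildGet, h]
    · simp only [pvChildSet, pvChildGet, if_neg h]
      rw [if_neg (fun h' : c = c' => h h'.symm)]
  | .cons a u rest, c, t, c' => by
    by_cases hac : a = c
    · subst hac
      by_cases h : c' = a
      · simp [pvChildSet, pvChildGet, h]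
      · have hset : pvChildSet (.cons a u rest) a t = .cons a t rest := by simp [pvChildSet]
        rw [hset]
        simp only [pvChildGet]
        rw [if_neg (fun h' : a = c' => h h'.symm), if_neg h, if_neg (fun h' : a = c' => h h'.symm)]
    · simp only [pvChildSet, if_neg hac, pvChildGet]
      by_cases h : a = c'
      · subst h
        rw [if_neg (fun h' : a = c => hac h')]
        simp
      · simp [h, pv_childGet_set rest c t c']

theorem pv_symAt_nil (s : Option (List Char)) (ch : PvChildren) :
    pvSymAt (.mk s ch) [] = s := rfl

theorem pv_symAt_cons (s : Option (List Char)) (ch : PvChildren) (c : Char) (q : List Char) :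
    pvSymAt (.mk s ch) (c :: q) = (pvChildGet ch c).bind (fun u => pvSymAt u q) := by
  simp [pvSymAt, pvFindT, pvCh, Option.bind_assoc]

theorem pv_symAt_empty (p : List Char) : pvSymAt (.mk none .nil) p = none := by
  cases p with
  | nil => rfl
  | cons c q => simp [pv_symAt_cons, pvChildGet]

theorem pv_symAt_insert (p : List Char) : ∀ (t : PvTrie) (k q : List Char),
    pvSymAt (pvTrieInsert t p k) q = if q = p then some ((pvSymAt t p).getD k) else pvSymAt t q := by
  induction p with
  | nil =>
    intro t k q
    cases t with | mk s ch =>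
    cases q with
    | nil => cases s <;> simp [pvTrieInsert, pv_symAt_nil]
    | cons a qs => simp [pvTrieInsert, pv_symAt_cons]
  | cons c ps ih =>
    intro t k q
    cases t with | mk s ch =>
    cases q with
    | nil => simp [pvTrieInsert, pv_symAt_nil]
    | cons a qs =>
      have hins : pvTrieInsert (.mk s ch) (c :: ps) k
            = .mk s (pvChildSet ch c (pvTrieInsert ((pvChildGet ch c).getD (.mk none .nil)) ps k)) := by
        simp [pvTrieInsert]
      rw [hins, pv_symAt_cons, pv_childGet_set]
      by_cases hac : a = c
      · subst hac
        rw [if_pos rfl, Option.bind_some, ih]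
        cases hg : pvChildGet ch a with
        | none => simp [hg, pv_symAt_empty, pv_symAt_cons, List.cons.injEq]
        | some u => simp [hg, pv_symAt_cons, List.cons.injEq]
      · rw [if_neg hac, if_neg (by simp [List.cons.injEq, hac]), pv_symAt_cons]

theorem pv_symAt_build (items : List (List Char × List Char)) : ∀ (t : PvTrie) (p : List Char),
    pvSymAt (pvBuild items t) p = (pvSymAt t p).or (pvFirstKey items p) := by
  induction items with
  | nil => intro t p; simp [pvBuild, pvFirstKey]
  | cons kv rest ih =>
    intro t p
    have : pvBuild (kv :: rest) t = pvBuild rest (pvTrieInsert t kv.2 kv.1) := rfl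
    rw [this, ih, pv_symAt_insert]
    by_cases h : p = kv.2
    · subst h
      cases hs : pvSymAt t kv.2 <;> simp [pvFirstKey, List.find?]
    · rw [if_neg h]
      cases hs : pvSymAt t p <;>
        simp [pvFirstKey, List.find?, show (kv.2 == p) = false from by simpa using fun h' => h h'.symm]

theorem pv_find_append (p : List Char) : ∀ (t : PvTrie) (q : List Char),
    pvFindT t (p ++ q) = (pvFindT t p).bind (fun u => pvFindT u q) := by
  induction p with
  | nil => intro t q; simp [pvFindT]
  | cons c ps ih =>
    intro t q
    cases t with | mk s ch =>
    simp only [List.cons_append, pvFindT, pvCh, Option.bind_assoc]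
    cases pvChildGet ch c <;> simp [ih]

theorem pv_firstKey_none_of_find_none (items : List (List Char × List Char)) (p : List Char)
    (h : pvFindT (pvBuild items (.mk none .nil)) p = none) : pvFirstKey items p = none := by
  have := pv_symAt_build items (.mk none .nil) p
  rw [pv_symAt_empty] at this
  simpa [pvSymAt, h] using this.symm

theorem pv_find_ext_none (items : List (List Char × List Char)) (p : List Char) (c : Char)
    (h : pvFindT (pvBuild items (.mk none .nil)) p = none) :
    pvFindT (pvBuild items (.mk none .nil)) (p ++ [c]) = none := by
  rw [pv_find_append, h]; rfl

theorem pv_arun_dead (items : List (List Char × List Char)) (cs : List Char) :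
    ∀ (tmp : List Char), pvFindT (pvBuild items (.mk none .nil)) tmp = none →
    pvArun items cs tmp = [] := by
  induction cs with
  | nil => intro tmp _; rfl
  | cons c rest ih =>
    intro tmp h
    have h' := pv_find_ext_none items tmp c h
    rw [pvArun, pv_firstKey_none_of_find_none items _ h']
    exact ih _ h'

theorem pv_firstKey_eq_symAt (items : List (List Char × List Char)) (p : List Char) :
    pvSymAt (pvBuild items (.mk none .nil)) p = pvFirstKey items p := by
  rw [pv_symAt_build, pv_symAt_empty, Option.none_or]

theorem pv_main (items : List (List Char × List Char)) (cs : List Char) :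
    ∀ (tmp : List Char) (cur : PvTrie),
    pvFindT (pvBuild items (.mk none .nil)) tmp = some cur →
    pvArun items cs tmp = (pvDecode (pvBuild items (.mk none .nil)) cur cs).flatten := by
  induction cs with
  | nil => intro tmp cur _; rfl
  | cons c rest ih =>
    intro tmp cur h
    have hfind : pvFindT (pvBuild items (.mk none .nil)) (tmp ++ [c])
        = pvChildGet (pvCh cur) c := by
      rw [pv_find_append, h, Option.bind_some]
      cases cur with | mk s ch =>
      simp only [pvFindT, pvCh]
      cases pvChildGet ch c <;> rfl
    rw [pvArun, pvDecode]
    cases hg : pvChildGet (pvCh cur) c with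
    | none =>
      have hnone : pvFindT (pvBuild items (.mk none .nil)) (tmp ++ [c]) = none := by rw [hfind, hg]
      rw [pv_firstKey_none_of_find_none items _ hnone]
      simp [pv_arun_dead items rest _ hnone]
    | some child =>
      have hsome : pvFindT (pvBuild items (.mk none .nil)) (tmp ++ [c]) = some child := by
        rw [hfind, hg]
      have hfk : pvFirstKey items (tmp ++ [c]) = pvSym child := by
        rw [← pv_firstKey_eq_symAt, pvSymAt, hsome, Option.bind_some]
      rw [hfk]
      cases hs : pvSym child with
      | some s =>
        simpa [hs] using congrArg (s ++ ·) (ih [] (pvBuild items (.mk none .nil)) rfl)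
      | none =>
        simpa [hs] using ih _ child hsome

theorem pv_idx_firstKey (items : List (List Char × List Char)) (p : List Char) :
    (List.idxOf? p (items.map (fun kv => kv.2))).bind
      (fun i => (items.map (fun kv => kv.1))[i]?) = pvFirstKey items p := by
  induction items with
  | nil => simp [pvFirstKey]
  | cons kv rest ih =>
    simp only [List.map_cons, List.idxOf?_cons]
    by_cases h : kv.2 = p
    · simp [h, pvFirstKey, List.find?]
    · have hb : (kv.2 == p) = false := by simpa using h
      rw [show pvFirstKey (kv :: rest) p = pvFirstKey rest p by
            simp [pvFirstKey, hb], ← ih]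
      cases hx : List.idxOf? p (rest.map (fun kv => kv.2)) with
      | none => simp [hb]
      | some i => simp [hb]

theorem pv_contains_firstKey (items : List (List Char × List Char)) (p : List Char) :
    (items.map (fun kv => kv.2)).contains p = (pvFirstKey items p).isSome := by
  induction items with
  | nil => simp [pvFirstKey]
  | cons kv rest ih =>
    by_cases h : kv.2 = p
    · simp [h, pvFirstKey, List.find?]
    · have hb : (kv.2 == p) = false := by simpa using h
      have hb' : (p == kv.2) = false := by simpa using fun h' => h h'.symm
      simpa [pvFirstKey, List.find?_cons, hb, hb'] using ih

theorem pv_foldA (items : List (List Char × List Char)) (cs : List Char) :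
    ∀ (out tmp : List Char),
    (cs.foldl (fun (st : List Char × List Char) c =>
      let tmp := st.2 ++ [c]
      if (items.map (fun kv => kv.2)).contains tmp then
        let indeks : Nat := (PySem.List.index? (items.map (fun kv => kv.2)) tmp).getD 0
        (st.1 ++ (PySem.List.pyGet? (items.map (fun kv => kv.1)) (indeks : Int)).getD [], [])
      else (st.1, tmp)) (out, tmp)).1 = out ++ pvArun items cs tmp := by
  induction cs with
  | nil => intro out tmp; simp [pvArun]
  | cons c rest ih =>
    intro out tmp
    simp only [PySem.List.index?, PySem.List.pyGet?_natCast] at ih ⊢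
    rw [List.foldl_cons, pvArun]
    by_cases hc : (items.map (fun kv => kv.2)).contains (tmp ++ [c])
    · have hsome : (pvFirstKey items (tmp ++ [c])).isSome := by
        rw [← pv_contains_firstKey]; exact hc
      obtain ⟨k, hk⟩ := Option.isSome_iff_exists.mp hsome
      have hidx : (List.idxOf? (tmp ++ [c]) (items.map (fun kv => kv.2))).isSome := by
        rw [List.isSome_idxOf?]
        exact List.contains_iff_mem.mp hc
      obtain ⟨i, hi⟩ := Option.isSome_iff_exists.mp hidx
      have hkey : (items.map (fun kv => kv.1))[i]? = some k := by
        have := pv_idx_firstKey items (tmp ++ [c])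
        rw [hi, Option.bind_some, hk] at this
        exact this
      simp only [hc, if_true, hi, Option.getD_some, hkey, hk]
      rw [ih]
      simp
    · have hnone : pvFirstKey items (tmp ++ [c]) = none := by
        have := pv_contains_firstKey items (tmp ++ [c])
        rw [Bool.eq_iff_iff] at this
        cases hfk : pvFirstKey items (tmp ++ [c]) with
        | none => rfl
        | some k => exact absurd (this.mpr (by simp [hfk])) hc
      have hcf : ((items.map (fun kv => kv.2)).contains (tmp ++ [c])) = false := by
        simpa using hc
      simp only [hcf, hnone]
      rw [ih]
      simp

theorem decode_char_eq (inputstring : String) (inputdict : List (String × String)) :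
    decode_char inputstring inputdict = decode_char_alt inputstring inputdict := by
  simp only [decode_char, decode_char_alt]
  rw [pv_foldA (pvDictItems inputdict) inputstring.toList [] []]
  rw [pv_main (pvDictItems inputdict) inputstring.toList [] _ rfl]
  rfl

-- ===== VERDICT (by name: the statement is the Claim_ definition above) =====
theorem decode_char_spec : Claim_equal_decode_char := by
  intro inputstring inputdict _
  exact decode_char_eq inputstring inputdict
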